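-- pv_equiv track=rewrite | github.com/nicholaspun/AA-Property-Sorter | amino.py | extractprop
-- ===== SOURCE A (Python) =====
-- def extractprop(sequence):
-- # [listof char] -> ([listof char], [listof char], [listof char])
-- # extractprop(sequence) produces a tuple containing a list of
-- #   charged AA's, polar AA's and hydro AA's, in that order.
--
--     charged = []
--     polar = []
--     hydro = []
--
--     for i in range(len(sequence)):
--         aa = sequence[i]
--         if (aa in 'RKDE'):
--             charged.append(aa)
--         elif (aa in 'QNHSTYCMW'):
--             polar.append(aa)
--         elif (aa in 'AILFVPG'):
--             hydro.append(aa)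
--         else:
--             continue
--
--     return (charged, polar, hydro)
-- ===== SOURCE B (Python) =====
-- # B: three independent filtering passes instead of one dispatching index loop.
-- # Intended for non-empty amino-acid strings; lists containing '' are outside Pre_
-- # ('' is a Python substring of everything, so A's elif order decides its class).
-- def extractprop(sequence):
--     charged = [aa for aa in sequence if aa in 'RKDE']
--     polar = [aa for aa in sequence if aa in 'QNHSTYCMW']
--     hydro = [aa for aa in sequence if aa in 'AILFVPG']
--     return (charged, polar, hydro)
-- ===== Notes on version B (the rewrite author's own statement) =====
-- stated objective: simpler
-- what changed: Replaced the single index-based loop with if/elif dispatch into three mutable accumulators by three independent filtering comprehensions, one full pass per category; Pre_ excludes lists containing the empty string — '' is a Python substring of every string, so for this degenerate non-amino-acid input A's elif chain places '' only in charged while B's independent filters list it in all three, and neither placement is specified.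
-- outside the precondition, e.g. on extractprop(['R', '']): A returns (['R', ''], [], []), B returns (['R', ''], [''], [''])
import Mathlib
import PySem

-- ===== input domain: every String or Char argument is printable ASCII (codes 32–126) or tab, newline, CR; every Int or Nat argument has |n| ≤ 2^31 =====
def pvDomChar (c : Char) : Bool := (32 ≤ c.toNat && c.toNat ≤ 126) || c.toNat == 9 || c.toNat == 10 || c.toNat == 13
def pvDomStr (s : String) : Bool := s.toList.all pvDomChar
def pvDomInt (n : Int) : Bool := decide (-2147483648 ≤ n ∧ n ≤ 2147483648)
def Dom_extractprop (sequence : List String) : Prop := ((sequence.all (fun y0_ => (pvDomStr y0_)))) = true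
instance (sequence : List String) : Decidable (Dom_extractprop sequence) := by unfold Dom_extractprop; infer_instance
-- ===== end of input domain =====

-- B replaces A's single index loop with if/elif dispatch by three independent filtering
-- passes, one per category (objective: simpler).

-- ===== PORT A =====
def extractprop (sequence : List String) : List String × List String × List String :=
  ((PySem.List.pyRange 0 (sequence.length : Int) 1).foldl
    (fun (st : List String × List String × List String) (i : Int) =>
      let aa := PySem.List.pyGetD sequence i ""
      if PySem.Str.isIn aa "RKDE" then (st.1 ++ [aa], st.2.1, st.2.2)
      else if PySem.Str.isIn aa "QNHSTYCMW" then (st.1, st.2.1 ++ [aa], st.2.2)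
      else if PySem.Str.isIn aa "AILFVPG" then (st.1, st.2.1, st.2.2 ++ [aa])
      else st)
    ([], [], []))

-- ===== PORT B =====
def extractprop_alt (sequence : List String) : List String × List String × List String :=
  (sequence.filter (fun aa => PySem.Str.isIn aa "RKDE"),
   sequence.filter (fun aa => PySem.Str.isIn aa "QNHSTYCMW"),
   sequence.filter (fun aa => PySem.Str.isIn aa "AILFVPG"))

-- ===== PRECONDITION & SPEC =====
-- Pre_ excludes lists containing the empty string: '' is a Python substring of every
-- string, so for this degenerate non-amino-acid input A's elif chain places '' only in
-- charged while B's independent filters list it in all three; neither placement is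
-- specified, so both values are defensible and the corner is excluded.
def Pre_extractprop (sequence : List String) : Prop := "" ∉ sequence
instance (sequence : List String) : Decidable (Pre_extractprop sequence) := by unfold Pre_extractprop; infer_instance
def pvWitness_extractprop : List String := ["R", "Q", "A", "xyz"]
def Spec_extractprop (sequence : List String) (out : List String × List String × List String) : Prop := out = extractprop_alt sequence
instance (sequence : List String) (out : List String × List String × List String) : Decidable (Spec_extractprop sequence out) := by unfold Spec_extractprop; infer_instance

-- ===== CLAIM (what is proved, stated in full; the proofs are below) =====
def Claim_equal_extractprop : Prop := ∀ (sequence : List String), Dom_extractprop sequence → Pre_extractprop sequence → Spec_extractprop sequence (extractprop sequence)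

-- ===== LEMMAS AND PROOFS =====

-- a non-empty common infix of two char lists with no common character is impossible
theorem pv_isIn_disjoint (aa s t : List Char)
    (hne : aa ≠ []) (hdisj : ∀ c, c ∈ s → c ∉ t)
    (h1 : PySem.Chars.isIn aa s = true) : PySem.Chars.isIn aa t = false := by
  by_contra h
  have h2 : PySem.Chars.isIn aa t = true := by
    cases hh : PySem.Chars.isIn aa t with
    | false => exact absurd hh h
    | true => rfl
  rw [PySem.Chars.isIn_iff_infix] at h1 h2
  obtain ⟨c, hc⟩ := List.exists_mem_of_ne_nil _ hne
  exact hdisj c (h1.subset hc) (h2.subset hc)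

set_option maxRecDepth 10000 in
theorem pv_loop_eq (sequence : List String) (hpre : "" ∉ sequence)
    (c p h : List String) :
    sequence.foldl
      (fun (st : List String × List String × List String) (aa : String) =>
        if PySem.Str.isIn aa "RKDE" then (st.1 ++ [aa], st.2.1, st.2.2)
        else if PySem.Str.isIn aa "QNHSTYCMW" then (st.1, st.2.1 ++ [aa], st.2.2)
        else if PySem.Str.isIn aa "AILFVPG" then (st.1, st.2.1, st.2.2 ++ [aa])
        else st)
      (c, p, h)
    = (c ++ sequence.filter (fun aa => PySem.Str.isIn aa "RKDE"),
       p ++ sequence.filter (fun aa => PySem.Str.isIn aa "QNHSTYCMW"),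
       h ++ sequence.filter (fun aa => PySem.Str.isIn aa "AILFVPG")) := by
  induction sequence generalizing c p h with
  | nil => simp
  | cons aa rest ih =>
    have hne : aa.toList ≠ [] := by
      intro he
      have : aa = "" := by
        have := congrArg String.ofList he
        simpa using this
      exact hpre (by simp [this])
    have hrest : "" ∉ rest := fun hm => hpre (List.mem_cons_of_mem _ hm)
    have ihC := fun c' p' h' => ih hrest c' p' h'
    simp only [PySem.Str.isIn] at ⊢
    simp at ihC
    by_cases h1 : PySem.Chars.isIn aa.toList (['R','K','D','E'] : List Char) = true
    · have h2 := pv_isIn_disjoint aa.toList (['R','K','D','E'] : List Char) (['Q','N','H','S','T','Y','C','M','W'] : List Char) hne (by intro c hc; fin_cases hc <;> decide) h1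
      have h3 := pv_isIn_disjoint aa.toList (['R','K','D','E'] : List Char) (['A','I','L','F','V','P','G'] : List Char) hne (by intro c hc; fin_cases hc <;> decide) h1
      simp [List.foldl_cons, h1, h2, h3, ihC]
    · by_cases h2 : PySem.Chars.isIn aa.toList (['Q','N','H','S','T','Y','C','M','W'] : List Char) = true
      · have h3 := pv_isIn_disjoint aa.toList (['Q','N','H','S','T','Y','C','M','W'] : List Char) (['A','I','L','F','V','P','G'] : List Char) hne (by intro c hc; fin_cases hc <;> decide) h2
        simp [List.foldl_cons, h1, h2, h3, ihC]
      · by_cases h3 : PySem.Chars.isIn aa.toList (['A','I','L','F','V','P','G'] : List Char) = true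
        · simp [List.foldl_cons, h1, h2, h3, ihC]
        · simp [List.foldl_cons, h1, h2, h3, ihC]

-- ===== VERDICT (by name: the statement is the Claim_ definition above) =====
theorem extractprop_spec : Claim_equal_extractprop := by
  intro sequence _hdom hpre
  unfold Spec_extractprop extractprop extractprop_alt
  show (PySem.List.pyRange 0 (sequence.length : Int) 1).foldl
      (fun (st : List String × List String × List String) (i : Int) =>
        (fun st (aa : String) =>
          if PySem.Str.isIn aa "RKDE" then (st.1 ++ [aa], st.2.1, st.2.2)
          else if PySem.Str.isIn aa "QNHSTYCMW" then (st.1, st.2.1 ++ [aa], st.2.2)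
          else if PySem.Str.isIn aa "AILFVPG" then (st.1, st.2.1, st.2.2 ++ [aa])
          else st) st (PySem.List.pyGetD sequence i ""))
      ([], [], []) = _
  rw [PySem.List.foldl_pyRange_zero_pyGetD' sequence ""
      (fun (st : List String × List String × List String) (aa : String) =>
        if PySem.Str.isIn aa "RKDE" then (st.1 ++ [aa], st.2.1, st.2.2)
        else if PySem.Str.isIn aa "QNHSTYCMW" then (st.1, st.2.1 ++ [aa], st.2.2)
        else if PySem.Str.isIn aa "AILFVPG" then (st.1, st.2.1, st.2.2 ++ [aa])
        else st)
      (([], [], []) : List String × List String × List String)]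
  simpa using pv_loop_eq sequence hpre [] [] []
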